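-- pv_equiv track=rewrite | github.com/posl/comment_recommendation | script/mod_gen/2_time/zh/246_D/4.py | check
-- ===== SOURCE A (Python) =====
-- def check(x):
--     a = 0
--     b = x
--     while a <= b:
--         if a**3 + a**2*b + a*b**2 + b**3 == x:
--             return True
--         elif a**3 + a**2*b + a*b**2 + b**3 < x:
--             a += 1
--         else:
--             b -= 1
--     return False
-- ===== SOURCE B (Python) =====
-- def check(x):
--     a = 0
--     while 4 * a**3 <= x:
--         lo, hi = a, x
--         while lo <= hi:
--             m = (lo + hi) // 2
--             v = a**3 + a**2*m + a*m**2 + m**3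
--             if v == x:
--                 return True
--             elif v < x:
--                 lo = m + 1
--             else:
--                 hi = m - 1
--         a += 1
--     return False
-- ===== Notes on version B (the rewrite author's own statement) =====
-- stated objective: faster
-- what changed: Replaces A's linear two-pointer scan with enumeration of the smaller summand up to its cube-root bound plus a binary search for the larger summand, cutting the work from linear in x to roots-of-x times a logarithm.
import Mathlib
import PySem

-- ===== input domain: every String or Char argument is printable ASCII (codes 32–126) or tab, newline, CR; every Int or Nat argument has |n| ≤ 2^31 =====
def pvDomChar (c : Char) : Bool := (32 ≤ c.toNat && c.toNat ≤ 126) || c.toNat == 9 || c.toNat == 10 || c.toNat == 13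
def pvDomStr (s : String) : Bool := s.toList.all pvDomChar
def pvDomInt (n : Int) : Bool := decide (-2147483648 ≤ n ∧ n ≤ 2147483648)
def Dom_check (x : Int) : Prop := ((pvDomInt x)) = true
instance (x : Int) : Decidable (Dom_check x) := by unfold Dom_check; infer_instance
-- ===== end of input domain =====

-- B replaces A's linear two-pointer scan by enumerating the smaller summand up to its
-- cube-root bound with a binary search for the larger one (objective: faster, measured).

-- the polynomial both programs test: a^3 + a^2*b + a*b^2 + b^3
def pvF (a b : Int) : Int := a^3 + a^2*b + a*b^2 + b^3

-- termination lemmas for the loop ports (named so the loops cite them by name)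
theorem pvDecA1 (a b : Int) (h : a ≤ b) : (b - (a + 1) + 1).toNat < (b - a + 1).toNat :=
  (Int.toNat_lt_toNat (by omega)).mpr (by omega)

theorem pvDecA2 (a b : Int) (h : a ≤ b) : (b - 1 - a + 1).toNat < (b - a + 1).toNat :=
  (Int.toNat_lt_toNat (by omega)).mpr (by omega)

-- ===== PORT A =====
-- A's while loop: two pointers a (up) and b (down)
def checkLoop (x a b : Int) : Bool :=
  if _h : a ≤ b then
    if pvF a b = x then true
    else if pvF a b < x then checkLoop x (a+1) b
    else checkLoop x a (b-1)
  else false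
termination_by (b - a + 1).toNat
decreasing_by
  · exact pvDecA1 a b _h
  · exact pvDecA2 a b _h

def check (x : Int) : Bool := checkLoop x 0 x

-- ===== PORT B =====
-- termination lemmas for B's two loops
theorem pvDecB1 (lo hi : Int) (h : lo ≤ hi) :
    (hi - (PySem.Int.floordiv (lo + hi) 2 + 1) + 1).toNat < (hi - lo + 1).toNat :=
  have hm := PySem.Int.floordiv_two_mid_bounds (lo := lo) (hi := hi) h
  (Int.toNat_lt_toNat (by omega)).mpr (by omega)

theorem pvDecB2 (lo hi : Int) (h : lo ≤ hi) :
    (PySem.Int.floordiv (lo + hi) 2 - 1 - lo + 1).toNat < (hi - lo + 1).toNat :=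
  have hm := PySem.Int.floordiv_two_mid_bounds (lo := lo) (hi := hi) h
  (Int.toNat_lt_toNat (by omega)).mpr (by omega)

-- inner while loop of Source B: binary search for b in [lo, hi]
def bsLoop (x a lo hi : Int) : Bool :=
  if _h : lo ≤ hi then
    let m := PySem.Int.floordiv (lo + hi) 2
    if pvF a m = x then true
    else if pvF a m < x then bsLoop x a (m+1) hi
    else bsLoop x a lo (m-1)
  else false
termination_by (hi - lo + 1).toNat
decreasing_by
  · exact pvDecB1 lo hi _h
  · exact pvDecB2 lo hi _h

-- used by aLoop's termination proof
theorem pv_le_of_cube (a x : Int) (ha : 0 ≤ a) (h : 4 * a^3 ≤ x) : a ≤ x := by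
  rcases Int.lt_or_le a 1 with h2 | h2
  · have h0 : a = 0 := by omega
    subst h0
    norm_num at h
    omega
  · have h3 : a ≤ a^3 := le_self_pow₀ h2 (by norm_num)
    have h4 : 0 ≤ a^3 := pow_nonneg ha 3
    omega

theorem pvDecB3 (x a : Int) (h : 4 * a ^ 3 ≤ x) :
    (x + 1 - (a + 1)).toNat + (-(a + 1)).toNat < (x + 1 - a).toNat + (-a).toNat := by
  by_cases hneg : a < 0
  · omega
  · have hax := pv_le_of_cube a x (by omega) h
    omega

-- outer while loop of Source B: enumerate a while its diagonal value stays within x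
def aLoop (x a : Int) : Bool :=
  if _h : 4 * a^3 ≤ x then
    if bsLoop x a a x then true else aLoop x (a+1)
  else false
termination_by ((x + 1 - a).toNat + (-a).toNat)
decreasing_by exact pvDecB3 x a _h

def check_alt (x : Int) : Bool := aLoop x 0

-- ===== PRECONDITION & SPEC =====
def Spec_check (x : Int) (out : Bool) : Prop := out = check_alt x
instance (x : Int) (out : Bool) : Decidable (Spec_check x out) := by unfold Spec_check; infer_instance

-- ===== CLAIM (what is proved, stated in full; the proofs are below) =====
def Claim_equal_check : Prop := ∀ (x : Int), Dom_check x → Spec_check x (check x)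

-- ===== LEMMAS AND PROOFS =====

-- pvF is nondecreasing in its second argument on the nonnegatives
theorem pvF_mono_b {a b1 b2 : Int} (ha : 0 ≤ a) (hb1 : 0 ≤ b1) (h : b1 ≤ b2) :
    pvF a b1 ≤ pvF a b2 := by
  unfold pvF
  nlinarith [mul_nonneg (mul_nonneg ha ha) (sub_nonneg.2 h),
             mul_nonneg ha (mul_nonneg (sub_nonneg.2 h) (by nlinarith : (0:Int) ≤ b1 + b2)),
             mul_nonneg (sub_nonneg.2 h) (by nlinarith [sq_nonneg (b1 + b2)] : (0:Int) ≤ b1^2 + b1*b2 + b2^2)]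

theorem pvF_comm (a b : Int) : pvF a b = pvF b a := by unfold pvF; ring

theorem pvF_mono_a {a1 a2 b : Int} (hb : 0 ≤ b) (ha1 : 0 ≤ a1) (h : a1 ≤ a2) :
    pvF a1 b ≤ pvF a2 b := by
  rw [pvF_comm a1 b, pvF_comm a2 b]; exact pvF_mono_b hb ha1 h

-- characterisation of A's loop
theorem checkLoop_iff (x a b : Int) (ha : 0 ≤ a) :
    checkLoop x a b = true ↔ ∃ p q, a ≤ p ∧ p ≤ q ∧ q ≤ b ∧ pvF p q = x := by
  fun_induction checkLoop x a b with
  | case1 a b hab heq =>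
      simp only [true_iff]
      exact ⟨a, b, le_refl a, hab, le_refl b, heq⟩
  | case2 a b hab heq hlt ih =>
      rw [ih (by omega)]
      constructor
      · rintro ⟨p, q, h1, h2, h3, h4⟩; exact ⟨p, q, by omega, h2, h3, h4⟩
      · rintro ⟨p, q, h1, h2, h3, h4⟩
        refine ⟨p, q, ?_, h2, h3, h4⟩
        by_contra hcon
        have hp : p = a := by omega
        subst hp
        have : pvF p q ≤ pvF p b := pvF_mono_b ha (by omega) h3
        omega
  | case3 a b hab heq hge ih =>
      rw [ih ha]
      constructor
      · rintro ⟨p, q, h1, h2, h3, h4⟩; exact ⟨p, q, h1, h2, by omega, h4⟩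
      · rintro ⟨p, q, h1, h2, h3, h4⟩
        refine ⟨p, q, h1, h2, ?_, h4⟩
        by_contra hcon
        have hq : q = b := by omega
        subst hq
        have : pvF a q ≤ pvF p q := pvF_mono_a (by omega) ha h1
        omega
  | case4 a b hab =>
      simp only [Bool.false_eq_true, false_iff]
      rintro ⟨p, q, h1, h2, h3, _⟩; omega

-- characterisation of B's binary search
theorem bsLoop_iff (x a lo hi : Int) (ha : 0 ≤ a) (hlo : 0 ≤ lo) :
    bsLoop x a lo hi = true ↔ ∃ q, lo ≤ q ∧ q ≤ hi ∧ pvF a q = x := by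
  fun_induction bsLoop x a lo hi with
  | case1 lo hi h m heq =>
      have hm := PySem.Int.floordiv_two_mid_bounds (lo := lo) (hi := hi) h
      simp only [true_iff]
      exact ⟨m, hm.1, hm.2, heq⟩
  | case2 lo hi h m heq hlt ih =>
      have hm := PySem.Int.floordiv_two_mid_bounds (lo := lo) (hi := hi) h
      rw [ih (by omega)]
      constructor
      · rintro ⟨q, h1, h2, h3⟩; exact ⟨q, by omega, h2, h3⟩
      · rintro ⟨q, h1, h2, h3⟩
        refine ⟨q, ?_, h2, h3⟩
        by_contra hcon
        have : pvF a q ≤ pvF a m := pvF_mono_b ha (by omega) (by omega)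
        omega
  | case3 lo hi h m heq hge ih =>
      have hm := PySem.Int.floordiv_two_mid_bounds (lo := lo) (hi := hi) h
      rw [ih hlo]
      constructor
      · rintro ⟨q, h1, h2, h3⟩; exact ⟨q, h1, by omega, h3⟩
      · rintro ⟨q, h1, h2, h3⟩
        refine ⟨q, h1, ?_, h3⟩
        by_contra hcon
        have : pvF a m ≤ pvF a q := pvF_mono_b ha (by omega) (by omega)
        omega
  | case4 lo hi h =>
      simp only [Bool.false_eq_true, false_iff]
      rintro ⟨q, h1, h2, _⟩; omega

theorem pvF_diag (a : Int) : pvF a a = 4 * a^3 := by unfold pvF; ring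

-- characterisation of B's outer loop
theorem aLoop_iff (x a : Int) (ha : 0 ≤ a) :
    aLoop x a = true ↔ ∃ p q, a ≤ p ∧ p ≤ q ∧ q ≤ x ∧ pvF p q = x := by
  fun_induction aLoop x a with
  | case1 a h hbs =>
      simp only [true_iff]
      obtain ⟨q, h1, h2, h3⟩ := (bsLoop_iff x a a x ha ha).1 hbs
      exact ⟨a, q, le_refl a, h1, h2, h3⟩
  | case2 a h hbs ih =>
      rw [ih (by omega)]
      constructor
      · rintro ⟨p, q, h1, h2, h3, h4⟩; exact ⟨p, q, by omega, h2, h3, h4⟩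
      · rintro ⟨p, q, h1, h2, h3, h4⟩
        refine ⟨p, q, ?_, h2, h3, h4⟩
        by_contra hcon
        have hp : p = a := by omega
        subst hp
        exact absurd ((bsLoop_iff x p p x ha ha).2 ⟨q, h2, h3, h4⟩) (by simp [hbs])
  | case3 a h =>
      simp only [Bool.false_eq_true, false_iff]
      rintro ⟨p, q, h1, h2, h3, h4⟩
      have hpp : pvF p p ≤ pvF p q := pvF_mono_b (by omega) (by omega) h2
      have hcube : a^3 ≤ p^3 := pow_le_pow_left₀ ha h1 3
      rw [pvF_diag] at hpp
      omega

theorem check_eq (x : Int) : check x = check_alt x := by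
  unfold check check_alt
  rw [Bool.eq_iff_iff, checkLoop_iff x 0 x (le_refl 0), aLoop_iff x 0 (le_refl 0)]

-- ===== VERDICT (by name: the statement is the Claim_ definition above) =====
theorem check_spec : Claim_equal_check := by
  intro x _
  unfold Spec_check
  exact check_eq x
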